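-- pv_equiv track=rewrite | github.com/Semtexcz/Bookvoice | bookvoice/text/chapter_selection.py | format_chapter_selection
-- ===== SOURCE A (Python) =====
-- from typing import Iterable, Sequence
--
-- def format_chapter_selection(indices: Iterable[int]) -> str:
--     """Format selected chapter indices into normalized compact range syntax."""
--
--     ordered = sorted(set(int(index) for index in indices))
--     if not ordered:
--         return ""
--
--     parts: list[str] = []
--     start = ordered[0]
--     end = ordered[0]
--
--     for index in ordered[1:]:
--         if index == end + 1:
--             end = index
--             continue
--         parts.append(str(start) if start == end else f"{start}-{end}")
--         start = index
--         end = index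
--     parts.append(str(start) if start == end else f"{start}-{end}")
--     return ",".join(parts)
-- ===== SOURCE B (Python) =====
-- def format_chapter_selection(indices):
--     """Format selected chapter indices into normalized compact range syntax."""
--     values = {int(index) for index in indices}
--     starts = sorted(x for x in values if x - 1 not in values)
--     ends = sorted(x for x in values if x + 1 not in values)
--     return ",".join(str(a) if a == b else f"{a}-{b}" for a, b in zip(starts, ends))
-- ===== Notes on version B (the rewrite author's own statement) =====
-- stated objective: alternative
-- what changed: Replaces A's sequential run-tracking fold over the sorted list by a set-boundary method: run starts are the values x with x-1 not in the set, run ends those with x+1 not in the set; the two sorted boundary lists are zipped into ranges, with no sequential state carried between elements.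
import Mathlib
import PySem

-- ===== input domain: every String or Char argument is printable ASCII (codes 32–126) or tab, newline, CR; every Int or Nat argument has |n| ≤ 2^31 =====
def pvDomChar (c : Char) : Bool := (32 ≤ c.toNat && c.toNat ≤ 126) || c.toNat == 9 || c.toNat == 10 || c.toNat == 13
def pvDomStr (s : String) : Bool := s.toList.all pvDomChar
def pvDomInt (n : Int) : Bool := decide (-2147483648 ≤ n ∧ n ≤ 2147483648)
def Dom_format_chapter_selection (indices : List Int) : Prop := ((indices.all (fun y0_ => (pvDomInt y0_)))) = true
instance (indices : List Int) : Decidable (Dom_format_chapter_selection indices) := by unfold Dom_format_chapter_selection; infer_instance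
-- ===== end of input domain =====

-- B replaces A's sequential run-tracking fold over the sorted list by a set-boundary
-- method: run starts (x-1 not in the set) and run ends (x+1 not in the set) are
-- collected independently, sorted, and zipped (objective: alternative, same cost).

-- ===== PORT A =====
-- foldl over ordered[1:] with state (parts, start, end), exactly A's loop
def format_chapter_selection (indices : List Int) : String :=
  let ordered := PySem.List.sorted (PySem.Set.ofList indices) (fun x => x) false
  match ordered with
  | [] => ""
  | h :: _ =>
    let st := (PySem.List.slice ordered (some 1) none).foldl
      (fun (st : List String × Int × Int) index =>
        if index = st.2.2 + 1 then (st.1, st.2.1, index)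
        else (st.1 ++ [if st.2.1 = st.2.2 then PySem.Int.toStr st.2.1
                       else PySem.Int.toStr st.2.1 ++ "-" ++ PySem.Int.toStr st.2.2],
              index, index))
      (([] : List String), h, h)
    PySem.Str.join "," (st.1 ++ [if st.2.1 = st.2.2 then PySem.Int.toStr st.2.1
                                 else PySem.Int.toStr st.2.1 ++ "-" ++ PySem.Int.toStr st.2.2])

-- ===== PORT B =====
-- values = {int(i) …}; starts/ends are the sorted boundary elements; zip them into ranges
def format_chapter_selection_alt (indices : List Int) : String :=
  let values : PySem.Set Int := PySem.Set.ofList indices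
  let starts := PySem.List.sorted (values.filter (fun x => !(PySem.Set.contains values (x - 1)))) (fun x => x) false
  let ends := PySem.List.sorted (values.filter (fun x => !(PySem.Set.contains values (x + 1)))) (fun x => x) false
  PySem.Str.join "," ((starts.zip ends).map
    (fun p => if p.1 = p.2 then PySem.Int.toStr p.1
              else PySem.Int.toStr p.1 ++ "-" ++ PySem.Int.toStr p.2))

-- ===== PRECONDITION & SPEC =====
def Spec_format_chapter_selection (indices : List Int) (out : String) : Prop := out = format_chapter_selection_alt indices
instance (indices : List Int) (out : String) : Decidable (Spec_format_chapter_selection indices out) := by unfold Spec_format_chapter_selection; infer_instance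

-- ===== CLAIM (what is proved, stated in full; the proofs are below) =====
def Claim_equal_format_chapter_selection : Prop := ∀ (indices : List Int), Dom_format_chapter_selection indices → Spec_format_chapter_selection indices (format_chapter_selection indices)

-- ===== LEMMAS AND PROOFS =====

-- rendering of one (start, end) run
def fmtR (p : Int × Int) : String :=
  if p.1 = p.2 then PySem.Int.toStr p.1 else PySem.Int.toStr p.1 ++ "-" ++ PySem.Int.toStr p.2

-- the maximal consecutive runs of a strictly increasing list, current run being (s, e)
def runsFrom (s e : Int) : List Int → List (Int × Int)
  | [] => [(s, e)]
  | x :: xs => if x = e + 1 then runsFrom s x xs else (s, e) :: runsFrom x x xs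

-- the run starts occurring after the already-open run ending (so far) at e
def tailStarts (e : Int) : List Int → List Int
  | [] => []
  | x :: v => if x = e + 1 then tailStarts x v else x :: tailStarts x v

-- A's fold computes the rendered runs
theorem A_fold (t : List Int) (parts : List String) (s e : Int) :
    (let st := t.foldl
      (fun (st : List String × Int × Int) index =>
        if index = st.2.2 + 1 then (st.1, st.2.1, index)
        else (st.1 ++ [if st.2.1 = st.2.2 then PySem.Int.toStr st.2.1
                       else PySem.Int.toStr st.2.1 ++ "-" ++ PySem.Int.toStr st.2.2],
              index, index))
      (parts, s, e)
     st.1 ++ [if st.2.1 = st.2.2 then PySem.Int.toStr st.2.1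
              else PySem.Int.toStr st.2.1 ++ "-" ++ PySem.Int.toStr st.2.2])
    = parts ++ (runsFrom s e t).map fmtR := by
  induction t generalizing parts s e with
  | nil => simp [runsFrom, fmtR]
  | cons x xs ih =>
    simp only [List.foldl_cons, runsFrom]
    by_cases hx : x = e + 1
    · rw [if_pos hx, if_pos hx]
      exact ih parts s x
    · rw [if_neg hx, if_neg hx]
      rw [ih]
      simp [fmtR, List.append_assoc]

theorem runsFrom_map_fst (u : List Int) (s e : Int) :
    (runsFrom s e u).map Prod.fst = s :: tailStarts e u := by
  induction u generalizing s e with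
  | nil => simp [runsFrom, tailStarts]
  | cons x v ih =>
    simp only [runsFrom, tailStarts]
    by_cases hx : x = e + 1
    · rw [if_pos hx, if_pos hx, ih]
    · rw [if_neg hx, if_neg hx, List.map_cons, ih]

-- run starts are exactly the elements whose predecessor is absent
theorem starts_filter (u : List Int) (e : Int) (h : (e :: u).Pairwise (· < ·)) :
    u.filter (fun y => !decide ((y - 1) ∈ e :: u)) = tailStarts e u := by
  induction u generalizing e with
  | nil => simp [tailStarts]
  | cons x v ih =>
    obtain ⟨he, hxv⟩ := List.pairwise_cons.1 h
    obtain ⟨hx, _⟩ := List.pairwise_cons.1 hxv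
    have hex : e < x := he x (by simp)
    have hcong : ∀ y ∈ v, (!decide ((y - 1) ∈ e :: x :: v)) = (!decide ((y - 1) ∈ x :: v)) := by
      intro y hy
      have : x < y := hx y hy
      have hne : ¬ (y - 1 = e) := by omega
      simp only [List.mem_cons, hne, false_or]
    simp only [tailStarts, List.filter_cons]
    by_cases hc : x = e + 1
    · have hmem : (x - 1) ∈ e :: x :: v := List.mem_cons.2 (Or.inl (by omega))
      simp only [hmem, decide_true, Bool.not_true, Bool.false_eq_true, if_false]
      rw [if_pos hc, List.filter_congr hcong]
      exact ih x hxv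
    · have hmem : (x - 1) ∉ e :: x :: v := by
        intro hmem
        rcases List.mem_cons.1 hmem with h1 | hmem
        · omega
        rcases List.mem_cons.1 hmem with h1 | h1
        · omega
        · have := hx _ h1; omega
      simp only [hmem, decide_false, Bool.not_false, if_true]
      rw [if_neg hc, List.filter_congr hcong]
      rw [ih x hxv]

-- run ends are exactly the elements whose successor is absent
theorem ends_filter (u : List Int) (s e : Int) (h : (e :: u).Pairwise (· < ·)) :
    (e :: u).filter (fun y => !decide ((y + 1) ∈ e :: u)) = (runsFrom s e u).map Prod.snd := by
  induction u generalizing s e with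
  | nil => simp [runsFrom]
  | cons x v ih =>
    obtain ⟨he, hxv⟩ := List.pairwise_cons.1 h
    obtain ⟨hx, _⟩ := List.pairwise_cons.1 hxv
    have hex : e < x := he x (by simp)
    have hcong : ∀ y ∈ x :: v, (!decide ((y + 1) ∈ e :: x :: v)) = (!decide ((y + 1) ∈ x :: v)) := by
      intro y hy
      have hxy : x ≤ y := by
        rcases List.mem_cons.1 hy with rfl | hyv
        · exact le_refl y
        · exact le_of_lt (hx y hyv)
      have hne : ¬ (y + 1 = e) := by omega
      simp only [List.mem_cons, hne, false_or]
    simp only [runsFrom]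
    rw [List.filter_cons]
    by_cases hc : x = e + 1
    · have hmem : (e + 1) ∈ e :: x :: v := List.mem_cons.2 (Or.inr (List.mem_cons.2 (Or.inl (by omega))))
      simp only [hmem, decide_true, Bool.not_true, Bool.false_eq_true, if_false]
      rw [if_pos hc, List.filter_congr hcong]
      exact ih s x hxv
    · have hmem : (e + 1) ∉ e :: x :: v := by
        intro hmem
        rcases List.mem_cons.1 hmem with h1 | hmem
        · omega
        rcases List.mem_cons.1 hmem with h1 | h1
        · omega
        · have := hx _ h1; omega
      simp only [hmem, decide_false, Bool.not_false, if_true]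
      rw [if_neg hc, List.map_cons, List.filter_congr hcong]
      rw [ih x x hxv]

-- sorting a filtered set gives the filtered sorted set (distinct elements)
theorem sorted_filter_set (indices : List Int) (p : Int → Bool) :
    PySem.List.sorted ((PySem.Set.ofList indices).filter p) (fun x => x) false
      = (PySem.List.sorted (PySem.Set.ofList indices) (fun x => x) false).filter p := by
  apply PySem.List.sorted_eq_of_perm_of_pairwise_lt
  · exact (PySem.List.sorted_perm _ _ _).filter p
  · exact List.Pairwise.filter p (PySem.List.sorted_ofList_pairwise_lt indices)

-- the Set.contains tests in B are membership in the sorted list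
theorem filter_contains_sub (indices : List Int) :
    (PySem.List.sorted (PySem.Set.ofList indices) (fun x => x) false).filter
        (fun x => !(PySem.Set.contains (PySem.Set.ofList indices) (x - 1)))
      = (PySem.List.sorted (PySem.Set.ofList indices) (fun x => x) false).filter
        (fun y => !decide ((y - 1) ∈ PySem.List.sorted (PySem.Set.ofList indices) (fun x => x) false)) := by
  apply List.filter_congr
  intro y _
  simp [PySem.Set.contains, PySem.List.mem_sorted]

theorem filter_contains_add (indices : List Int) :
    (PySem.List.sorted (PySem.Set.ofList indices) (fun x => x) false).filter
        (fun x => !(PySem.Set.contains (PySem.Set.ofList indices) (x + 1)))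
      = (PySem.List.sorted (PySem.Set.ofList indices) (fun x => x) false).filter
        (fun y => !decide ((y + 1) ∈ PySem.List.sorted (PySem.Set.ofList indices) (fun x => x) false)) := by
  apply List.filter_congr
  intro y _
  simp [PySem.Set.contains, PySem.List.mem_sorted]

-- ===== VERDICT (by name: the statement is the Claim_ definition above) =====
theorem format_chapter_selection_spec : Claim_equal_format_chapter_selection := by
  intro indices _
  unfold Spec_format_chapter_selection format_chapter_selection format_chapter_selection_alt
  dsimp only
  rw [sorted_filter_set indices (fun x => !(PySem.Set.contains (PySem.Set.ofList indices) (x - 1)))]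
  rw [sorted_filter_set indices (fun x => !(PySem.Set.contains (PySem.Set.ofList indices) (x + 1)))]
  rw [filter_contains_sub indices, filter_contains_add indices]
  have hpw := PySem.List.sorted_ofList_pairwise_lt indices
  cases hord : PySem.List.sorted (PySem.Set.ofList indices) (fun x => x) false with
  | nil =>
    simp only [List.filter_nil]
    rfl
  | cons h t =>
    rw [hord] at hpw
    obtain ⟨hh, htt⟩ := List.pairwise_cons.1 hpw
    dsimp only
    rw [PySem.List.slice_from_one, List.tail_cons]
    have ha := A_fold t [] h h
    simp only at ha
    rw [ha, List.nil_append]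
    have hstarts : (h :: t).filter (fun y => !decide ((y - 1) ∈ h :: t))
        = (runsFrom h h t).map Prod.fst := by
      have hmem : (h - 1) ∉ h :: t := by
        intro hmem
        rcases List.mem_cons.1 hmem with h1 | h1
        · omega
        · have := hh _ h1; omega
      rw [List.filter_cons]
      simp only [hmem, decide_false, Bool.not_false, if_true]
      rw [starts_filter t h hpw, runsFrom_map_fst]
    have hends := ends_filter t h h hpw
    have hz : (List.map Prod.fst (runsFrom h h t)).zip (List.map Prod.snd (runsFrom h h t))
        = runsFrom h h t := (List.zip_of_prod rfl rfl).symm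
    rw [hstarts, hends, hz]
    rfl
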